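-- pv_equiv track=rewrite | github.com/t0r1n88/Lachesis | mental_state/dopok_leon_osin.py | calc_value_oo
-- ===== SOURCE A (Python) =====
-- def calc_value_oo(row):
--     """
--     Функция для подсчета значения
--     :return: число
--     """
--     lst_pr = [1,4,5,6,10,14,16,21]
--     lst_neg = [4,10]
--     value_forward = 0  # результат
--     for idx, value in enumerate(row,1):
--         if idx in lst_pr:
--             if idx not in lst_neg:
--                 value_forward += value
--             else:
--                 if value == 1:
--                     value_forward += 4
--                 elif value == 2:
--                     value_forward += 3
--                 elif value == 3:
--                     value_forward += 2
--                 else: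
--                     value_forward += 1
--
--
--     return value_forward
-- ===== SOURCE B (Python) =====
-- def calc_value_oo(row):
--     n = len(row)
--     total = 0
--     for i in (1, 5, 6, 14, 16, 21):
--         if i <= n:
--             total += row[i - 1]
--     for i in (4, 10):
--         if i <= n:
--             total += {1: 4, 2: 3, 3: 2}.get(row[i - 1], 1)
--     return total
-- ===== Notes on version B (the rewrite author's own statement) =====
-- stated objective: simpler
-- what changed: Instead of enumerating the whole row and testing each 1-based index for membership in the scored-position lists, B iterates directly over the two fixed position tuples, bounds-checking each and indexing into the row, with the negative positions mapped through a small dict.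
import Mathlib
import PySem

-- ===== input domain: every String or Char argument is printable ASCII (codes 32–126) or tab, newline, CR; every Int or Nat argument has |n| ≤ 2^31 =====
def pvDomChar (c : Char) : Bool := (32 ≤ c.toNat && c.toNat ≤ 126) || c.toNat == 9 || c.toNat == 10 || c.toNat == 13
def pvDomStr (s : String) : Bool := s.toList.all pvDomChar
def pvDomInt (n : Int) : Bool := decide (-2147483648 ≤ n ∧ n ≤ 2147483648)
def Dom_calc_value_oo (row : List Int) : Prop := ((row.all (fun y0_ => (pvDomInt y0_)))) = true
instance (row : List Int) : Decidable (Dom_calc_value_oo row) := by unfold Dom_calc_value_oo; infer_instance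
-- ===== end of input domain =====

-- B iterates over the two fixed scored-position lists with bounds checks (a dict lookup for the
-- negative positions) instead of enumerating the whole row and testing membership; objective: simpler.

-- ===== PORT A =====
-- one step of A's loop 'for idx, value in enumerate(row, 1): …' (p = (idx, value))
def pvStepA (value_forward : Int) (p : Int × Int) : Int :=
  if p.1 ∈ ([1, 4, 5, 6, 10, 14, 16, 21] : List Int) then
    if p.1 ∉ ([4, 10] : List Int) then value_forward + p.2
    else
      if p.2 = 1 then value_forward + 4
      else if p.2 = 2 then value_forward + 3
      else if p.2 = 3 then value_forward + 2
      else value_forward + 1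
  else value_forward

def calc_value_oo (row : List Int) : Int :=
  (PySem.List.enumerate row 1).foldl pvStepA 0

-- ===== PORT B =====
def calc_value_oo_alt (row : List Int) : Int :=
  let n : Int := PySem.List.len row
  let total := ([1, 5, 6, 14, 16, 21] : List Int).foldl
    (fun total i => if i ≤ n then total + PySem.List.pyGetD row (i - 1) 0 else total) 0
  ([4, 10] : List Int).foldl
    (fun total i => if i ≤ n then
        total + (PySem.Dict.ofList [((1 : Int), (4 : Int)), (2, 3), (3, 2)]).getD
                  (PySem.List.pyGetD row (i - 1) 0) 1
      else total) total

-- ===== PRECONDITION & SPEC =====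
def Spec_calc_value_oo (row : List Int) (out : Int) : Prop := out = calc_value_oo_alt row
instance (row : List Int) (out : Int) : Decidable (Spec_calc_value_oo row out) := by unfold Spec_calc_value_oo; infer_instance

-- ===== CLAIM (what is proved, stated in full; the proofs are below) =====
def Claim_equal_calc_value_oo : Prop := ∀ (row : List Int), Dom_calc_value_oo row → Spec_calc_value_oo row (calc_value_oo row)

-- ===== LEMMAS AND PROOFS =====

-- weight contributed by value v at scored 1-based position k
def pvM (k v : Int) : Int :=
  if k = 4 ∨ k = 10 then (if v = 1 then 4 else if v = 2 then 3 else if v = 3 then 2 else 1) else v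

-- contribution of absolute position k when the loop, starting at index idx, runs over tail t
def pvTerm (k idx : Int) (t : List Int) : Int :=
  if idx ≤ k ∧ k - idx < (t.length : Int) then pvM k (t.getD (k - idx).toNat 0) else 0

-- total contribution of the eight scored positions, loop starting at idx
def pvG (idx : Int) (t : List Int) : Int :=
  pvTerm 1 idx t + pvTerm 4 idx t + pvTerm 5 idx t + pvTerm 6 idx t +
  pvTerm 10 idx t + pvTerm 14 idx t + pvTerm 16 idx t + pvTerm 21 idx t

theorem pvTerm_nil (k idx : Int) : pvTerm k idx [] = 0 := by
  unfold pvTerm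
  rw [if_neg (by rintro ⟨h1, h2⟩; simp at h2; omega)]

theorem pvTerm_cons (k idx v : Int) (t : List Int) :
    pvTerm k idx (v :: t) = (if k = idx then pvM k v else 0) + pvTerm k (idx + 1) t := by
  unfold pvTerm
  simp only [List.length_cons]
  split_ifs <;> try omega
  · subst_vars; simp
  · have he : (k - idx).toNat = (k - (idx + 1)).toNat + 1 := by omega
    rw [he, List.getD_cons_succ]; ring

theorem pvStepA_eq (acc idx v : Int) :
    pvStepA acc (idx, v) =
      acc + ((if (1 : Int) = idx then pvM 1 v else 0) + (if (4 : Int) = idx then pvM 4 v else 0) +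
             (if (5 : Int) = idx then pvM 5 v else 0) + (if (6 : Int) = idx then pvM 6 v else 0) +
             (if (10 : Int) = idx then pvM 10 v else 0) + (if (14 : Int) = idx then pvM 14 v else 0) +
             (if (16 : Int) = idx then pvM 16 v else 0) + (if (21 : Int) = idx then pvM 21 v else 0)) := by
  by_cases h1 : idx = 1
  · subst h1; simp [pvStepA, pvM]
  · by_cases h4 : idx = 4
    · subst h4; simp [pvStepA, pvM]; split_ifs <;> ring
    · by_cases h5 : idx = 5
      · subst h5; simp [pvStepA, pvM]
      · by_cases h6 : idx = 6
        · subst h6; simp [pvStepA, pvM]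
        · by_cases h10 : idx = 10
          · subst h10; simp [pvStepA, pvM]; split_ifs <;> ring
          · by_cases h14 : idx = 14
            · subst h14; simp [pvStepA, pvM]
            · by_cases h16 : idx = 16
              · subst h16; simp [pvStepA, pvM]
              · by_cases h21 : idx = 21
                · subst h21; simp [pvStepA, pvM]
                · simp [pvStepA, h1, h4, h5, h6, h10, h14, h16, h21,
                        Ne.symm h1, Ne.symm h4, Ne.symm h5, Ne.symm h6,
                        Ne.symm h10, Ne.symm h14, Ne.symm h16, Ne.symm h21]

theorem pvFoldA (t : List Int) : ∀ (idx acc : Int),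
    (PySem.List.enumerate t idx).foldl pvStepA acc = acc + pvG idx t := by
  induction t with
  | nil => intro idx acc; simp [PySem.List.enumerate_nil, pvG, pvTerm_nil]
  | cons v t ih =>
    intro idx acc
    rw [PySem.List.enumerate_cons, List.foldl_cons, ih]
    unfold pvG
    rw [pvStepA_eq]
    rw [pvTerm_cons 1, pvTerm_cons 4, pvTerm_cons 5, pvTerm_cons 6,
        pvTerm_cons 10, pvTerm_cons 14, pvTerm_cons 16, pvTerm_cons 21]
    ring

-- at start index 1, the contribution of position k is a bounds-guarded list access
theorem pvTerm_one (k : Int) (hk : 1 ≤ k) (row : List Int) :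
    pvTerm k 1 row = if k ≤ (row.length : Int) then pvM k (row.getD (k - 1).toNat 0) else 0 := by
  unfold pvTerm
  by_cases h : k ≤ (row.length : Int)
  · rw [if_pos ⟨hk, by omega⟩, if_pos h]
  · rw [if_neg (by omega), if_neg h]

theorem pvDictGetD (v : Int) :
    (PySem.Dict.ofList [((1 : Int), (4 : Int)), (2, 3), (3, 2)]).getD v 1 = pvM 4 v := by
  by_cases h1 : v = 1
  · subst h1; decide
  · by_cases h2 : v = 2
    · subst h2; decide
    · by_cases h3 : v = 3
      · subst h3; decide
      · have e1 : ((1 : Int) == v) = false := by simp; omega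
        have e2 : ((2 : Int) == v) = false := by simp; omega
        have e3 : ((3 : Int) == v) = false := by simp; omega
        simp [PySem.Dict.ofList, PySem.Dict.update, PySem.Dict.insert, PySem.Dict.empty,
              PySem.Dict.getD, PySem.Dict.get?, List.find?, e1, e2, e3, pvM, h1, h2, h3]

theorem pvGetD_shift (row : List Int) (k : Int) (hk : 1 ≤ k) :
    PySem.List.pyGetD row (k - 1) 0 = row.getD (k - 1).toNat 0 := by
  by_cases h : k - 1 < (row.length : Int)
  · rw [PySem.List.pyGetD_eq_getElem row 0 (by omega) (by exact_mod_cast h)]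
    rw [List.getD_eq_getElem?_getD, List.getElem?_eq_getElem (by omega)]
    simp
  · have hn : PySem.List.pyGet? row (k - 1) = none := by
      rw [PySem.List.pyGet?_eq_none_iff]
      unfold PySem.Raise.InRange
      simp; omega
    rw [PySem.List.pyGetD_of_none _ _ _ hn]
    rw [List.getD_eq_getElem?_getD, List.getElem?_eq_none_iff.mpr (by omega)]
    rfl

theorem pvM_fwd1 (v : Int) : pvM 1 v = v := by norm_num [pvM]
theorem pvM_fwd5 (v : Int) : pvM 5 v = v := by norm_num [pvM]
theorem pvM_fwd6 (v : Int) : pvM 6 v = v := by norm_num [pvM]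
theorem pvM_fwd14 (v : Int) : pvM 14 v = v := by norm_num [pvM]
theorem pvM_fwd16 (v : Int) : pvM 16 v = v := by norm_num [pvM]
theorem pvM_fwd21 (v : Int) : pvM 21 v = v := by norm_num [pvM]
theorem pvM_ten (v : Int) : pvM 10 v = pvM 4 v := by norm_num [pvM]

-- a bounds-guarded accumulating fold equals the starting value plus a sum of guarded terms
theorem pvFoldB (n : Int) (f : Int → Int) (l : List Int) : ∀ (a : Int),
    l.foldl (fun t i => if i ≤ n then t + f i else t) a
      = a + (l.map (fun i => if i ≤ n then f i else 0)).sum := by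
  induction l with
  | nil => intro a; simp
  | cons x xs ih =>
    intro a
    simp only [List.foldl_cons, List.map_cons, List.sum_cons]
    by_cases h : x ≤ n
    · rw [if_pos h, if_pos h, ih]; ring
    · rw [if_neg h, if_neg h, ih]; ring

-- ===== VERDICT (by name: the statement is the Claim_ definition above) =====
set_option maxHeartbeats 1000000 in
theorem calc_value_oo_spec : Claim_equal_calc_value_oo := by
  intro row _
  unfold Spec_calc_value_oo calc_value_oo calc_value_oo_alt
  rw [pvFoldA]
  simp only []
  rw [pvFoldB, pvFoldB]
  simp only [PySem.List.len_eq, List.map_cons, List.map_nil, List.sum_cons, List.sum_nil]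
  unfold pvG
  rw [pvTerm_one 1 (by omega), pvTerm_one 4 (by omega), pvTerm_one 5 (by omega),
      pvTerm_one 6 (by omega), pvTerm_one 10 (by omega), pvTerm_one 14 (by omega),
      pvTerm_one 16 (by omega), pvTerm_one 21 (by omega)]
  simp only [pvM_fwd1, pvM_fwd5, pvM_fwd6, pvM_fwd14, pvM_fwd16, pvM_fwd21, pvM_ten,
      pvDictGetD, pvGetD_shift row 1 (by omega), pvGetD_shift row 4 (by omega),
      pvGetD_shift row 5 (by omega), pvGetD_shift row 6 (by omega),
      pvGetD_shift row 10 (by omega), pvGetD_shift row 14 (by omega),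
      pvGetD_shift row 16 (by omega), pvGetD_shift row 21 (by omega)]
  ring
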